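-- pv_equiv track=rewrite | github.com/kulbirminhas-aiinitiative/maestro-platform | maestro-hive/tests/e2e_validation/ai_agent_reviews.py | _identify_common_themes
-- ===== SOURCE A (Python) =====
-- from typing import Dict, Any, List
--
-- def _identify_common_themes(findings: List[Dict[str, Any]]) -> List[str]:
--     """Identify common issues across reviews"""
--     themes = []
--
--     # Check for custom phase issues
--     custom_phase_count = len([f for f in findings if 'custom' in str(f).lower() or 'No SLO' in str(f)])
--     if custom_phase_count >= 2:
--         themes.append(f"Custom phase node validation gap (mentioned by {custom_phase_count} reviewers)")
--
--     # Check for gate evaluation errors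
--     gate_error_count = len([f for f in findings if 'gate' in str(f).lower() and 'error' in str(f).lower()])
--     if gate_error_count >= 2:
--         themes.append(f"Gate condition evaluation issues (mentioned by {gate_error_count} reviewers)")
--
--     # Check for security concerns
--     security_count = len([f for f in findings if f['severity'] in ['HIGH', 'MEDIUM'] and 'security' in str(f).lower()])
--     if security_count >= 1:
--         themes.append(f"Security validation gaps (mentioned by {security_count} reviewers)")
--
--     return themes
-- ===== SOURCE B (Python) =====
-- from typing import Dict, Any, List
--
-- def _identify_common_themes(findings: List[Dict[str, Any]]) -> List[str]:
--     """Identify common issues across reviews (single pass over findings)."""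
--     custom_phase_count = gate_error_count = security_count = 0
--     for f in findings:
--         s = str(f)
--         sl = s.lower()
--         sev = f['severity']
--         if 'custom' in sl or 'No SLO' in s:
--             custom_phase_count += 1
--         if 'gate' in sl and 'error' in sl:
--             gate_error_count += 1
--         if sev in ('HIGH', 'MEDIUM') and 'security' in sl:
--             security_count += 1
--
--     themes = []
--     if custom_phase_count >= 2:
--         themes.append(f"Custom phase node validation gap (mentioned by {custom_phase_count} reviewers)")
--     if gate_error_count >= 2:
--         themes.append(f"Gate condition evaluation issues (mentioned by {gate_error_count} reviewers)")
--     if security_count >= 1: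
--         themes.append(f"Security validation gaps (mentioned by {security_count} reviewers)")
--     return themes
-- ===== Notes on version B (the rewrite author's own statement) =====
-- stated objective: simpler
-- what changed: Replaces the three separate list-comprehension scans (each calling str(f)/lower() again) with one loop over findings that computes str(f) and its lowercase once per finding and maintains three integer counters, then emits the same three theme strings under the same thresholds.
import Mathlib
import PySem

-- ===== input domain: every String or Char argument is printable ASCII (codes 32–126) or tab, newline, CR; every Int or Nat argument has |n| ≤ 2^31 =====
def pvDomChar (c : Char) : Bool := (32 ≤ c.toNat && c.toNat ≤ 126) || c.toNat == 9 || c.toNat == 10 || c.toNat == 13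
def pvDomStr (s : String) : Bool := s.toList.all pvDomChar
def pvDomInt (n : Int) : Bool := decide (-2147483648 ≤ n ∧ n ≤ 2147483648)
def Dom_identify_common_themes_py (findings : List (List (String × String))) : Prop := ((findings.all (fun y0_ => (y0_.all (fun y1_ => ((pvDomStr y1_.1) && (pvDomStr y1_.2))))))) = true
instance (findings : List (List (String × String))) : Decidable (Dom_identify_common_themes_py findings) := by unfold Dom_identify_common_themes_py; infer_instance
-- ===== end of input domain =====

-- B makes ONE pass over findings with three counters, computing str(f)/lower() once per
-- finding, instead of A's three separate comprehension scans; same strings, same order.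

-- ===== shared helpers: Python's str(dict) / repr(str), exact on the ASCII domain =====
-- repr escape of one character (domain chars only need \\, the quote, \t, \n, \r)
def pvReprEsc (q : Char) (c : Char) : List Char :=
  if c = '\\' then ['\\', '\\']
  else if c = q then ['\\', q]
  else if c = '\t' then ['\\', 't']
  else if c = '\n' then ['\\', 'n']
  else if c = '\r' then ['\\', 'r']
  else [c]

-- Python repr(s): single quotes unless s has a ' and no " (then double quotes)
def pvReprStr (s : String) : List Char :=
  let cs := s.toList
  let q := if cs.contains '\'' && !(cs.contains '"') then '"' else '\''
  q :: (cs.flatMap (pvReprEsc q) ++ [q])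

-- Python str(f) for a dict of strings: "{'k': 'v', ...}" in dict insertion order
-- (PySem.Dict.ofList gives dict(pairs) semantics: last value wins, first position kept)
def pvStrOfFinding (f : List (String × String)) : String :=
  String.ofList ('{' :: (List.intercalate [',', ' ']
    (((PySem.Dict.ofList f).items).map
      (fun p => pvReprStr p.1 ++ ':' :: ' ' :: pvReprStr p.2)) ++ ['}']))

-- f['severity'] (Pre_ guarantees the key is present; "" is never 'HIGH'/'MEDIUM')
def pvSeverity (f : List (String × String)) : String :=
  (PySem.Dict.ofList f).getD "severity" ""

-- ===== PORT A =====
def identify_common_themes_py (findings : List (List (String × String))) : List String :=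
  let themes : List String := []
  let custom_phase_count : Int :=
    ((findings.filter (fun f =>
      PySem.Str.isIn "custom" (PySem.Str.lower (pvStrOfFinding f)) ||
      PySem.Str.isIn "No SLO" (pvStrOfFinding f))).length : Int)
  let themes := if custom_phase_count ≥ 2 then
      themes ++ ["Custom phase node validation gap (mentioned by " ++ PySem.Int.toStr custom_phase_count ++ " reviewers)"]
    else themes
  let gate_error_count : Int :=
    ((findings.filter (fun f =>
      PySem.Str.isIn "gate" (PySem.Str.lower (pvStrOfFinding f)) &&
      PySem.Str.isIn "error" (PySem.Str.lower (pvStrOfFinding f)))).length : Int)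
  let themes := if gate_error_count ≥ 2 then
      themes ++ ["Gate condition evaluation issues (mentioned by " ++ PySem.Int.toStr gate_error_count ++ " reviewers)"]
    else themes
  let security_count : Int :=
    ((findings.filter (fun f =>
      (pvSeverity f == "HIGH" || pvSeverity f == "MEDIUM") &&
      PySem.Str.isIn "security" (PySem.Str.lower (pvStrOfFinding f)))).length : Int)
  let themes := if security_count ≥ 1 then
      themes ++ ["Security validation gaps (mentioned by " ++ PySem.Int.toStr security_count ++ " reviewers)"]
    else themes
  themes

-- ===== PORT B =====
def pvStepB (acc : Int × Int × Int) (f : List (String × String)) : Int × Int × Int :=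
  let s := pvStrOfFinding f
  let sl := PySem.Str.lower s
  let sev := pvSeverity f
  (acc.1 + (if PySem.Str.isIn "custom" sl || PySem.Str.isIn "No SLO" s then 1 else 0),
   acc.2.1 + (if PySem.Str.isIn "gate" sl && PySem.Str.isIn "error" sl then 1 else 0),
   acc.2.2 + (if (sev == "HIGH" || sev == "MEDIUM") && PySem.Str.isIn "security" sl then 1 else 0))

def identify_common_themes_py_alt (findings : List (List (String × String))) : List String :=
  let c := findings.foldl pvStepB (0, 0, 0)
  let themes : List String := []
  let themes := if c.1 ≥ 2 then
      themes ++ ["Custom phase node validation gap (mentioned by " ++ PySem.Int.toStr c.1 ++ " reviewers)"]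
    else themes
  let themes := if c.2.1 ≥ 2 then
      themes ++ ["Gate condition evaluation issues (mentioned by " ++ PySem.Int.toStr c.2.1 ++ " reviewers)"]
    else themes
  let themes := if c.2.2 ≥ 1 then
      themes ++ ["Security validation gaps (mentioned by " ++ PySem.Int.toStr c.2.2 ++ " reviewers)"]
    else themes
  themes

-- ===== PRECONDITION & SPEC =====
-- Pre_ excludes exactly the findings lacking a 'severity' key, on which A (and B) raise KeyError.
def Pre_identify_common_themes_py (findings : List (List (String × String))) : Prop :=
  ∀ f ∈ findings, "severity" ∈ f.map Prod.fst
instance (findings : List (List (String × String))) : Decidable (Pre_identify_common_themes_py findings) := by unfold Pre_identify_common_themes_py; infer_instance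

def pvWitness_identify_common_themes_py : (List (List (String × String))) :=
  [[("severity", "HIGH"), ("issue", "security hole")], [("severity", "LOW")]]

def Spec_identify_common_themes_py (findings : List (List (String × String))) (out : List String) : Prop := out = identify_common_themes_py_alt findings
instance (findings : List (List (String × String))) (out : List String) : Decidable (Spec_identify_common_themes_py findings out) := by unfold Spec_identify_common_themes_py; infer_instance

-- ===== CLAIM (what is proved, stated in full; the proofs are below) =====
def Claim_equal_identify_common_themes_py : Prop := ∀ (findings : List (List (String × String))), Dom_identify_common_themes_py findings → Pre_identify_common_themes_py findings → Spec_identify_common_themes_py findings (identify_common_themes_py findings)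

-- ===== LEMMAS AND PROOFS =====
-- B's single loop equals A's three filter counts, for any starting accumulators.
lemma pv_loop_eq (l : List (List (String × String))) (a b c : Int) :
    l.foldl pvStepB (a, b, c) =
      (a + ((l.filter (fun f =>
          PySem.Str.isIn "custom" (PySem.Str.lower (pvStrOfFinding f)) ||
          PySem.Str.isIn "No SLO" (pvStrOfFinding f))).length : Int),
       b + ((l.filter (fun f =>
          PySem.Str.isIn "gate" (PySem.Str.lower (pvStrOfFinding f)) &&
          PySem.Str.isIn "error" (PySem.Str.lower (pvStrOfFinding f)))).length : Int),
       c + ((l.filter (fun f =>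
          (pvSeverity f == "HIGH" || pvSeverity f == "MEDIUM") &&
          PySem.Str.isIn "security" (PySem.Str.lower (pvStrOfFinding f)))).length : Int)) := by
  induction l generalizing a b c with
  | nil => simp
  | cons h t ih =>
    simp only [List.foldl_cons, List.filter_cons, pvStepB, ih]
    split_ifs <;> simp [Prod.ext_iff] <;> ring_nf <;> simp

-- ===== VERDICT (by name: the statement is the Claim_ definition above) =====
theorem identify_common_themes_py_spec : Claim_equal_identify_common_themes_py := by
  intro findings _ _
  unfold Spec_identify_common_themes_py identify_common_themes_py identify_common_themes_py_alt
  rw [pv_loop_eq]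
  simp
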